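-- pv_equiv track=rewrite | github.com/anastamerr/BugBunny | backend/src/api/routes/chat.py | _cap_lines
-- ===== SOURCE A (Python) =====
-- def _cap_lines(lines: list[str], max_chars: int) -> list[str]:
--     capped: list[str] = []
--     total = 0
--     for line in lines:
--         line_len = len(line) + 1
--         if total + line_len > max_chars:
--             break
--         capped.append(line)
--         total += line_len
--     return capped
-- ===== SOURCE B (Python) =====
-- def _cap_lines(lines: list[str], max_chars: int) -> list[str]:
--     # Pass 1: cumulative cost table (len(line)+1 running totals).
--     totals = []
--     running = 0
--     for line in lines:
--         running += len(line) + 1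
--         totals.append(running)
--     # Pass 2: first index whose running total exceeds the cap.
--     cut = len(lines)
--     for i, t in enumerate(totals):
--         if t > max_chars:
--             cut = i
--             break
--     return lines[:cut]
-- ===== Notes on version B (the rewrite author's own statement) =====
-- stated objective: alternative
-- what changed: Instead of interleaving the running total with the cap check in one break loop, B precomputes the prefix-sum cost table, locates the first index exceeding the cap, and returns a single slice of the input.
import Mathlib
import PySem

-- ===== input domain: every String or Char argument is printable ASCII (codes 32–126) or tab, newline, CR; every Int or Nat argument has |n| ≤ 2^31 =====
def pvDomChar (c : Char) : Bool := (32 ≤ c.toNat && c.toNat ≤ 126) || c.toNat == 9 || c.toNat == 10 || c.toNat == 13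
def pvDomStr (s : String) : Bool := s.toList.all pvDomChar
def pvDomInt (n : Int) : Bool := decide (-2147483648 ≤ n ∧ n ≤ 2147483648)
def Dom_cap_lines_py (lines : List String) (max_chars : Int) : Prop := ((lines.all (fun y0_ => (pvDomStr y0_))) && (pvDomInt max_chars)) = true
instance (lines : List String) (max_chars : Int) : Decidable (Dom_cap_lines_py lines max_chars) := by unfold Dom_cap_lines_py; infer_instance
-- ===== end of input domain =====

-- B precomputes the prefix-sum cost table, finds the first index over the cap, and returns one slice,
-- instead of A's single break-loop with a running total (objective: alternative).


-- ===== PORT A =====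
-- for-loop with break, state (capped, total), as recursion over the lines
def cap_lines_py_loop (lines : List String) (max_chars : Int) (capped : List String) (total : Int) : List String :=
  match lines with
  | [] => capped
  | line :: rest =>
    let line_len := PySem.Str.len line + 1
    if total + line_len > max_chars then capped
    else cap_lines_py_loop rest max_chars (capped ++ [line]) (total + line_len)

def cap_lines_py (lines : List String) (max_chars : Int) : List String :=
  cap_lines_py_loop lines max_chars [] 0

-- ===== PORT B =====
-- pass 1: the running-total table (recursion over the lines carrying `running`)
def cap_lines_py_totals (lines : List String) (running : Int) : List Int :=
  match lines with
  | [] => []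
  | line :: rest =>
    let running' := running + (PySem.Str.len line + 1)
    running' :: cap_lines_py_totals rest running'

-- pass 2: the enumerate loop with break = first index with t > max_chars, default len(lines)
def cap_lines_py_cut (totals : List Int) (max_chars : Int) (i : Nat) (cut : Nat) : Nat :=
  match totals with
  | [] => cut
  | t :: rest => if t > max_chars then i else cap_lines_py_cut rest max_chars (i + 1) cut

-- lines[:cut] with 0 ≤ cut is exactly List.take
def cap_lines_py_alt (lines : List String) (max_chars : Int) : List String :=
  let totals := cap_lines_py_totals lines 0
  let cut := cap_lines_py_cut totals max_chars 0 lines.length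
  List.take cut lines

-- ===== PRECONDITION & SPEC =====
def Spec_cap_lines_py (lines : List String) (max_chars : Int) (out : List String) : Prop := out = cap_lines_py_alt lines max_chars
instance (lines : List String) (max_chars : Int) (out : List String) : Decidable (Spec_cap_lines_py lines max_chars out) := by unfold Spec_cap_lines_py; infer_instance

-- ===== CLAIM (what is proved, stated in full; the proofs are below) =====
def Claim_equal_cap_lines_py : Prop := ∀ (lines : List String) (max_chars : Int), Dom_cap_lines_py lines max_chars → Spec_cap_lines_py lines max_chars (cap_lines_py lines max_chars)

-- ===== LEMMAS AND PROOFS =====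
-- common reference: take the head while it fits, recursing with the remaining budget
def capSpec (lines : List String) (budget : Int) : List String :=
  match lines with
  | [] => []
  | l :: rest =>
    if PySem.Str.len l + 1 > budget then []
    else l :: capSpec rest (budget - (PySem.Str.len l + 1))

theorem cap_lines_py_loop_eq (lines : List String) (max_chars total : Int) (capped : List String) :
    cap_lines_py_loop lines max_chars capped total = capped ++ capSpec lines (max_chars - total) := by
  induction lines generalizing capped total max_chars with
  | nil => simp [cap_lines_py_loop, capSpec]
  | cons l rest ih =>
    simp only [cap_lines_py_loop, capSpec]
    by_cases h : total + (PySem.Str.len l + 1) > max_chars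
    · rw [if_pos h, if_pos (by omega)]; simp
    · rw [if_neg h, if_neg (by omega), ih,
        show max_chars - (total + (PySem.Str.len l + 1))
           = max_chars - total - (PySem.Str.len l + 1) from by omega]
      simp

theorem cap_lines_py_cut_shift (totals : List Int) (max_chars : Int) (i cut : Nat) :
    cap_lines_py_cut totals max_chars (i + 1) (cut + 1)
      = cap_lines_py_cut totals max_chars i cut + 1 := by
  induction totals generalizing i with
  | nil => simp [cap_lines_py_cut]
  | cons t rest ih =>
    simp only [cap_lines_py_cut]
    split_ifs with h
    · rfl
    · exact ih (i + 1)

theorem cap_lines_py_alt_eq (lines : List String) (max_chars running : Int) :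
    List.take (cap_lines_py_cut (cap_lines_py_totals lines running) max_chars 0 lines.length) lines
      = capSpec lines (max_chars - running) := by
  induction lines generalizing running with
  | nil => simp [cap_lines_py_totals, cap_lines_py_cut, capSpec]
  | cons l rest ih =>
    simp only [cap_lines_py_totals, cap_lines_py_cut, capSpec, List.length_cons]
    by_cases h : running + (PySem.Str.len l + 1) > max_chars
    · rw [if_pos h, if_pos (by omega)]; simp
    · rw [if_neg h, if_neg (by omega), cap_lines_py_cut_shift, List.take_succ_cons,
        ih (running + (PySem.Str.len l + 1)),
        show max_chars - (running + (PySem.Str.len l + 1))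
           = max_chars - running - (PySem.Str.len l + 1) from by omega]

-- ===== VERDICT (by name: the statement is the Claim_ definition above) =====
theorem cap_lines_py_spec : Claim_equal_cap_lines_py := by
  intro lines max_chars _
  unfold Spec_cap_lines_py cap_lines_py cap_lines_py_alt
  rw [cap_lines_py_loop_eq, cap_lines_py_alt_eq]
  simp
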